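-- pv_equiv track=rewrite | github.com/IvoSte/EmergentSymbioticSpeciation | speciation/species_detection.py | get_quasispecies_binary_knockout
-- ===== SOURCE A (Python) =====
-- def get_quasispecies_binary_knockout(genes):
--     # In the toxin model, the sign of the gene value is all that matters. Converting genes to binary values to integer gives us clear and easy species.
--     binary_genes = [
--         [1 if gene != 0 else 0 for gene in chromosome] for chromosome in genes
--     ]
--     prediction = [
--         int(
--             "".join(map(str, binary_chromosome)), 10
--         )  # set 0 to 2 for base 2 int instead of bitstring
--         for binary_chromosome in binary_genes
--     ]
--     return prediction
-- ===== SOURCE B (Python) =====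
-- def get_quasispecies_binary_knockout(genes):
--     # The species id is the decimal number whose digits are the knockout bits
--     # (1 for an active gene, 0 for a knocked-out one). Seed the accumulator
--     # with the leading bit and fold the remaining genes in arithmetically.
--     prediction = []
--     for chromosome in genes:
--         acc = 1 if chromosome[0] != 0 else 0
--         for gene in chromosome[1:]:
--             acc = acc * 10 + (1 if gene != 0 else 0)
--         prediction.append(acc)
--     return prediction
-- ===== Notes on version B (the rewrite author's own statement) =====
-- stated objective: alternative
-- what changed: Replaces the binary-list + string-join + int() parse per chromosome with an arithmetic fold seeded from the first gene's bit (acc = acc*10 + (gene != 0) over the rest); Pre_ excludes inputs containing an empty chromosome, where A's int('') raises ValueError (B's chromosome[0] raises IndexError there).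
import Mathlib
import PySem

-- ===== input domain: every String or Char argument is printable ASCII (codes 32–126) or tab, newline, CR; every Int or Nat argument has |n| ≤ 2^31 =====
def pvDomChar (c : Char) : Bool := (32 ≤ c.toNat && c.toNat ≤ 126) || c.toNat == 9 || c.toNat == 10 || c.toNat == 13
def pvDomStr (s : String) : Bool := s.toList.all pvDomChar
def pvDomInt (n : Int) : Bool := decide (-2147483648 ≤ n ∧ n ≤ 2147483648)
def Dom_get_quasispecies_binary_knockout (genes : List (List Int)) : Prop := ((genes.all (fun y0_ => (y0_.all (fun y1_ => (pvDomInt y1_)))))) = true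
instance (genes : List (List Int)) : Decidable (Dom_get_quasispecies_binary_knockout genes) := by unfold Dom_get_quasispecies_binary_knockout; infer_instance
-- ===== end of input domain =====

-- B replaces A's binary-list + string-join + int() parse with a direct arithmetic fold per chromosome (objective: alternative decomposition, same cost).

-- ===== PORT A =====
def get_quasispecies_binary_knockout (genes : List (List Int)) : List Int :=
  let binary_genes :=
    genes.map (fun chromosome => chromosome.map (fun gene => if gene ≠ 0 then (1 : Int) else 0))
  let prediction :=
    binary_genes.map (fun binary_chromosome =>
      (PySem.Int.ofStrBase?
        (PySem.Str.join "" (binary_chromosome.map (fun d => PySem.Int.toStr d))) 10).getD 0)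
  prediction

-- ===== PORT B =====
def get_quasispecies_binary_knockout_alt (genes : List (List Int)) : List Int :=
  genes.foldl
    (fun prediction (chromosome : List Int) =>
      -- chromosome[0]: PySem.List.pyGet? (none = IndexError, excluded by Pre_; 0 is a placeholder there)
      let acc0 : Int := match PySem.List.pyGet? chromosome 0 with
        | some g => if g ≠ 0 then (1 : Int) else 0
        | none => 0
      prediction ++
        [(PySem.List.slice chromosome (some 1) none).foldl
          (fun acc (gene : Int) => acc * 10 + (if gene ≠ 0 then 1 else 0)) acc0])
    []

-- ===== PRECONDITION & SPEC =====
-- Pre_ excludes inputs containing an empty chromosome: there A's int("") raises ValueError.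
def Pre_get_quasispecies_binary_knockout (genes : List (List Int)) : Prop :=
  ∀ c ∈ genes, c ≠ []
instance (genes : List (List Int)) : Decidable (Pre_get_quasispecies_binary_knockout genes) := by
  unfold Pre_get_quasispecies_binary_knockout; infer_instance
def pvWitness_get_quasispecies_binary_knockout : List (List Int) := [[1, 0, -3], [5]]

def Spec_get_quasispecies_binary_knockout (genes : List (List Int)) (out : List Int) : Prop := out = get_quasispecies_binary_knockout_alt genes
instance (genes : List (List Int)) (out : List Int) : Decidable (Spec_get_quasispecies_binary_knockout genes out) := by unfold Spec_get_quasispecies_binary_knockout; infer_instance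

-- ===== CLAIM (what is proved, stated in full; the proofs are below) =====
def Claim_equal_get_quasispecies_binary_knockout : Prop := ∀ (genes : List (List Int)), Dom_get_quasispecies_binary_knockout genes → Pre_get_quasispecies_binary_knockout genes → Spec_get_quasispecies_binary_knockout genes (get_quasispecies_binary_knockout genes)
-- ===== LEMMAS AND PROOFS =====

-- the decimal value of a '0'/'1' character string, as A's int(s, 10) computes it
def bitF (cs : List Char) (acc : ℕ) : ℕ := cs.foldl (fun a ch => a*10 + (if ch = '1' then 1 else 0)) acc

theorem go01 (go : List Char → Bool → ℕ → Option ℕ)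
    (hnil : ∀ acc, go [] true acc = some acc)
    (h0 : ∀ rest ad acc, go ('0'::rest) ad acc = go rest true (acc*10))
    (h1 : ∀ rest ad acc, go ('1'::rest) ad acc = go rest true (acc*10+1)) :
    ∀ cs acc, (∀ c ∈ cs, c = '0' ∨ c = '1') → go cs true acc = some (bitF cs acc) := by
  intro cs
  induction cs with
  | nil => intro acc _; simpa [bitF] using hnil acc
  | cons c rest ih =>
    intro acc hm
    rcases hm c List.mem_cons_self with rfl | rfl
    · rw [h0]; rw [ih _ (fun x hx => hm x (List.mem_cons_of_mem _ hx))]; simp [bitF]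
    · rw [h1]; rw [ih _ (fun x hx => hm x (List.mem_cons_of_mem _ hx))]; simp [bitF]

-- parametric over PySem's private digit parser: pinned by unification at the use sites below
theorem dv01 {dv : ℕ → List Char → Option ℕ} {go : List Char → Bool → ℕ → Option ℕ}
    {c : Char} {cs : List Char} {o : Option ℕ}
    (heq : dv 10 (c::cs) = o)
    (h : ∀ x ∈ c::cs, x = '0' ∨ x = '1')
    (hdv0 : ∀ cs, dv 10 ('0'::cs) = go cs true 0)
    (hdv1 : ∀ cs, dv 10 ('1'::cs) = go cs true 1)
    (hnil : ∀ acc, go [] true acc = some acc)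
    (h0 : ∀ rest ad acc, go ('0'::rest) ad acc = go rest true (acc*10))
    (h1 : ∀ rest ad acc, go ('1'::rest) ad acc = go rest true (acc*10+1)) :
    o = some (bitF (c::cs) 0) := by
  have hrest : ∀ x ∈ cs, x = '0' ∨ x = '1' := fun x hx => h x (List.mem_cons_of_mem _ hx)
  rcases h c List.mem_cons_self with rfl | rfl
  · rw [← heq, hdv0, go01 go hnil h0 h1 cs 0 hrest]; simp [bitF]
  · rw [← heq, hdv1, go01 go hnil h0 h1 cs 1 hrest]; simp [bitF]

theorem strip_id (p : Char → Bool) (cs : List Char) (h : ∀ c ∈ cs, p c = false) :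
    (List.dropWhile p (List.dropWhile p cs).reverse).reverse = cs := by
  have h1 : List.dropWhile p cs = cs := by
    cases cs with
    | nil => rfl
    | cons a l => simp [List.dropWhile, h a List.mem_cons_self]
  have h2 : List.dropWhile p cs.reverse = cs.reverse := by
    cases hc : cs.reverse with
    | nil => rfl
    | cons a l => simp [List.dropWhile, h a (by rw [← List.mem_reverse, hc]; simp)]
  rw [h1, h2, List.reverse_reverse]

theorem main01 (c : Char) (rest : List Char) (h : ∀ x ∈ c::rest, x = '0' ∨ x = '1') :
    PySem.Int.ofCharsBase? (c::rest) 10 = some ((bitF (c::rest) 0 : ℕ) : ℤ) := by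
  have hsp : ∀ x ∈ c::rest, PySem.Int.isIntSpace x = false := by
    intro x hx; rcases h x hx with rfl | rfl <;> decide
  have hrest : ∀ x ∈ rest, x = '0' ∨ x = '1' := fun x hx => h x (List.mem_cons_of_mem _ hx)
  rcases h c List.mem_cons_self with rfl | rfl
  · -- c = '0'
    cases rest with
    | nil => decide
    | cons c2 rest2 =>
      have h2 : ∀ x ∈ '0'::c2::rest2, x = '0' ∨ x = '1' := h
      unfold PySem.Int.ofCharsBase?
      rw [strip_id _ _ hsp]
      rcases hrest c2 List.mem_cons_self with rfl | rfl <;>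
      · simp
        split
        · next heq =>
          have hno := dv01 heq h2 (fun cs => rfl) (fun cs => rfl) (fun acc => rfl) (fun r ad acc => rfl) (fun r ad acc => rfl)
          simp at hno
        · next n heq =>
          have hs := dv01 heq h2 (fun cs => rfl) (fun cs => rfl) (fun acc => rfl) (fun r ad acc => rfl) (fun r ad acc => rfl)
          simp at hs
          simp [hs]
  · -- c = '1'
    unfold PySem.Int.ofCharsBase?
    rw [strip_id _ _ hsp]
    simp
    split
    · next heq =>
      have hno := dv01 heq h (fun cs => rfl) (fun cs => rfl) (fun acc => rfl) (fun r ad acc => rfl) (fun r ad acc => rfl)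
      simp at hno
    · next n heq =>
      have hs := dv01 heq h (fun cs => rfl) (fun cs => rfl) (fun acc => rfl) (fun r ad acc => rfl) (fun r ad acc => rfl)
      simp at hs
      simp [hs]

-- the '0'/'1' characters of a chromosome
def bchars (c : List Int) : List Char := c.map (fun g => if g ≠ 0 then '1' else '0')

theorem bchars_mem (c : List Int) : ∀ x ∈ bchars c, x = '0' ∨ x = '1' := by
  intro x hx
  rcases List.mem_map.1 hx with ⟨g, _, rfl⟩
  by_cases hg : g = 0 <;> simp [hg]

theorem map_toChars (c : List Int) :
    (c.map (fun gene => if gene ≠ 0 then (1 : Int) else 0)).map (fun d => PySem.Int.toChars d)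
      = (bchars c).map (fun ch => [ch]) := by
  induction c with
  | nil => rfl
  | cons g rest ih =>
    simp only [bchars, List.map_cons] at ih ⊢
    exact congrArg₂ List.cons (by by_cases h : g = 0 <;> simp [h] <;> rfl) ih

theorem bitF_cons (ch : Char) (cs : List Char) (a : ℕ) :
    bitF (ch::cs) a = bitF cs (a*10 + (if ch = '1' then 1 else 0)) := rfl

theorem bitF_int (c : List Int) :
    ∀ a : ℕ, ((bitF (bchars c) a : ℕ) : ℤ)
      = c.foldl (fun acc gene => acc * 10 + (if gene ≠ 0 then 1 else 0)) (a : ℤ) := by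
  induction c with
  | nil => intro a; simp [bitF, bchars]
  | cons g rest ih =>
    intro a
    show ((bitF ((if g ≠ 0 then '1' else '0') :: bchars rest) a : ℕ) : ℤ) = _
    rw [bitF_cons, List.foldl_cons, ih]
    by_cases hg : g = 0 <;> simp [hg]

theorem chrom_eq (c : List Int) (hne : c ≠ []) :
    (PySem.Int.ofStrBase?
        (PySem.Str.join ""
          ((c.map (fun gene => if gene ≠ 0 then (1 : Int) else 0)).map (fun d => PySem.Int.toStr d))) 10).getD 0
      = c.foldl (fun acc gene => acc * 10 + (if gene ≠ 0 then 1 else 0)) 0 := by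
  have hchars :
      (PySem.Str.join ""
        ((c.map (fun gene => if gene ≠ 0 then (1 : Int) else 0)).map (fun d => PySem.Int.toStr d))).toList
        = bchars c := by
    rw [PySem.Str.toList_join]
    have h1 : ((c.map (fun gene => if gene ≠ 0 then (1 : Int) else 0)).map (fun d => PySem.Int.toStr d)).map String.toList
        = (bchars c).map (fun ch => [ch]) := by
      rw [List.map_map]
      rw [show (String.toList ∘ fun d => PySem.Int.toStr d) = (fun d => PySem.Int.toChars d) from
        funext (fun d => PySem.Int.toList_toStr d)]
      exact map_toChars c
    rw [h1]
    simp [PySem.Chars.join_nil_singletons (bchars c)]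
  rw [PySem.Int.ofStrBase?.eq_1, hchars]
  cases hb : bchars c with
  | nil => exact absurd (by simpa [bchars] using congrArg List.length hb) (by simpa using hne)
  | cons ch rest =>
    rw [main01 ch rest (hb ▸ bchars_mem c)]
    simpa [hb] using (bitF_int c 0)

-- B's per-chromosome value, as the port computes it
def bval (c : List Int) : Int :=
  (PySem.List.slice c (some 1) none).foldl
    (fun acc (gene : Int) => acc * 10 + (if gene ≠ 0 then 1 else 0))
    (match PySem.List.pyGet? c 0 with
     | some g => if g ≠ 0 then (1 : Int) else 0
     | none => 0)

theorem bval_eq (c : List Int) (hne : c ≠ []) :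
    bval c = c.foldl (fun acc gene => acc * 10 + (if gene ≠ 0 then 1 else 0)) 0 := by
  cases c with
  | nil => exact absurd rfl hne
  | cons g rest =>
    have hget : PySem.List.pyGet? (g :: rest) (0 : Int) = some g := by
      simp [PySem.List.pyGet?, PySem.List.pyIdx?]
    have hsl : PySem.List.slice (g :: rest) (some 1) none = rest :=
      PySem.List.slice_from_one (g :: rest)
    rw [bval, hget, hsl, List.foldl_cons]
    by_cases hg : g = 0 <;> simp [hg]

theorem alt_eq_map (genes : List (List Int)) :
    get_quasispecies_binary_knockout_alt genes = genes.map bval := by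
  unfold get_quasispecies_binary_knockout_alt
  suffices h : ∀ (l : List (List Int)) (acc : List Int),
      l.foldl (fun p (c : List Int) =>
        p ++ [(PySem.List.slice c (some 1) none).foldl
          (fun a (gene : Int) => a * 10 + (if gene ≠ 0 then 1 else 0))
          (match PySem.List.pyGet? c 0 with
           | some g => if g ≠ 0 then (1 : Int) else 0
           | none => 0)]) acc
        = acc ++ l.map bval by
    simpa using h genes []
  intro l
  induction l with
  | nil => intro acc; simp
  | cons c rest ih =>
    intro acc
    rw [List.foldl_cons, ih, List.map_cons]
    simp [bval]

-- ===== VERDICT (by name: the statement is the Claim_ definition above) =====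
theorem get_quasispecies_binary_knockout_spec : Claim_equal_get_quasispecies_binary_knockout := by
  intro genes _ hpre
  unfold Spec_get_quasispecies_binary_knockout
  rw [alt_eq_map]
  show (genes.map (fun chromosome => chromosome.map (fun gene => if gene ≠ 0 then (1 : Int) else 0))).map
      (fun binary_chromosome =>
        (PySem.Int.ofStrBase?
          (PySem.Str.join "" (binary_chromosome.map (fun d => PySem.Int.toStr d))) 10).getD 0) = _
  rw [List.map_map]
  refine List.map_congr_left (fun c hc => ?_)
  simp only [Function.comp_apply]
  rw [bval_eq c (hpre c hc)]
  exact chrom_eq c (hpre c hc)
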